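-- pv_equiv track=rewrite | github.com/JoelSerrao/CleanGallery | Cleaner.py | group_duplicates
-- ===== SOURCE A (Python) =====
-- HASH_THRESHOLD = 3
--
-- def group_duplicates(hashes):
--     groups = []
--     used = set()
--     items = list(hashes.items())
--
--     for i, (p1, h1) in enumerate(items):
--         if p1 in used:
--             continue
--         group = [p1]
--         for p2, h2 in items[i + 1:]:
--             if p2 in used:
--                 continue
--             if abs(h1 - h2) <= HASH_THRESHOLD:
--                 group.append(p2)
--         if len(group) > 1:
--             used.update(group)
--             groups.append(group)
--
--     return groups
-- ===== SOURCE B (Python) =====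
-- HASH_THRESHOLD = 3
--
-- def group_duplicates(hashes):
--     items = list(hashes.items())
--     buckets = {}
--     for j, (p, h) in enumerate(items):
--         buckets.setdefault(h, []).append((j, p))
--     groups = []
--     used = set()
--     for i, (p1, h1) in enumerate(items):
--         if p1 in used:
--             continue
--         cands = []
--         for h in (h1 - 3, h1 - 2, h1 - 1, h1, h1 + 1, h1 + 2, h1 + 3):
--             for j, p2 in buckets.get(h, ()):
--                 if j > i and p2 not in used:
--                     cands.append((j, p2))
--         if cands:
--             cands.sort(key=lambda t: t[0])
--             group = [p1] + [p for _, p in cands]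
--             used.update(group)
--             groups.append(group)
--     return groups
-- ===== Notes on version B (the rewrite author's own statement) =====
-- stated objective: alternative
-- what changed: Replaces A's rescan of the whole item tail for every representative by an integer-hash bucket index built once: each unused representative queries only the 7 buckets h1-3..h1+3, filters out used/earlier entries and sorts the few candidates by original index.
import Mathlib
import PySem

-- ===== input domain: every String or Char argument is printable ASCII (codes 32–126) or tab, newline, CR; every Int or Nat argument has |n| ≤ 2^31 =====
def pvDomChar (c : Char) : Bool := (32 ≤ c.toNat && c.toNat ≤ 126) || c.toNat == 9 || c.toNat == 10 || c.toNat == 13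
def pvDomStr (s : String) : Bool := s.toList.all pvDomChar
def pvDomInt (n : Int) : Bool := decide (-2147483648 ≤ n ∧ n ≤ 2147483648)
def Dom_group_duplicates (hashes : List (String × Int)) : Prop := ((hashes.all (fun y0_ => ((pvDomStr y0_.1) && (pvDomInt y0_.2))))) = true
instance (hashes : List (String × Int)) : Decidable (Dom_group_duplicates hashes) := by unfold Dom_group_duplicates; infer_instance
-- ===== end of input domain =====

-- B replaces A's inner rescan of the item tail by a bucket index on the integer hash (query h1±3, sort candidates by original index); an alternative algorithm, same results.

def HASH_THRESHOLD : Int := 3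

-- ===== PORT A =====
def group_duplicates (hashes : List (String × Int)) : List (List String) :=
  let items := (PySem.Dict.ofList hashes).items
  (((PySem.List.enumerate items 0).foldl (fun (st : List (List String) × PySem.Set String) q =>
    let i := q.1; let p1 := q.2.1; let h1 := q.2.2
    if PySem.Set.contains st.2 p1 then st
    else
      let group := (PySem.List.slice items (some (i + 1)) none).foldl (fun g r =>
        if PySem.Set.contains st.2 r.1 then g
        else if |h1 - r.2| ≤ HASH_THRESHOLD then g ++ [r.1] else g) [p1]
      if group.length > 1 then (st.1 ++ [group], PySem.Set.update st.2 group) else st)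
    ([], PySem.Set.empty))).1

-- ===== PORT B =====
def group_duplicates_alt (hashes : List (String × Int)) : List (List String) :=
  let items := (PySem.Dict.ofList hashes).items
  let buckets := (PySem.List.enumerate items 0).foldl
    (fun (b : PySem.Dict Int (List (Int × String))) q => b.modify q.2.2 [] (· ++ [(q.1, q.2.1)]))
    PySem.Dict.empty
  (((PySem.List.enumerate items 0).foldl (fun (st : List (List String) × PySem.Set String) q =>
    let i := q.1; let p1 := q.2.1; let h1 := q.2.2
    if PySem.Set.contains st.2 p1 then st
    else
      let cands := [h1 - 3, h1 - 2, h1 - 1, h1, h1 + 1, h1 + 2, h1 + 3].foldl (fun c h =>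
        (buckets.getD h []).foldl (fun c r =>
          if r.1 > i ∧ PySem.Set.contains st.2 r.2 = false then c ++ [r] else c) c) []
      if cands.isEmpty then st
      else
        let group := p1 :: (PySem.List.sorted cands (fun t => t.1) false).map (·.2)
        (st.1 ++ [group], PySem.Set.update st.2 group))
    ([], PySem.Set.empty))).1

-- ===== PRECONDITION & SPEC =====
def Spec_group_duplicates (hashes : List (String × Int)) (out : List (List String)) : Prop := out = group_duplicates_alt hashes
instance (hashes : List (String × Int)) (out : List (List String)) : Decidable (Spec_group_duplicates hashes out) := by unfold Spec_group_duplicates; infer_instance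

-- ===== CLAIM (what is proved, stated in full; the proofs are below) =====
def Claim_equal_group_duplicates : Prop := ∀ (hashes : List (String × Int)), Dom_group_duplicates hashes → Spec_group_duplicates hashes (group_duplicates hashes)

-- ===== LEMMAS AND PROOFS =====

-- Step function of A's outer loop (definitionally the lambda inside `group_duplicates`)
def pvStepA (items : List (String × Int)) (st : List (List String) × PySem.Set String)
    (q : Int × String × Int) : List (List String) × PySem.Set String :=
  if PySem.Set.contains st.2 q.2.1 then st
  else
    let group := (PySem.List.slice items (some (q.1 + 1)) none).foldl (fun g r =>
      if PySem.Set.contains st.2 r.1 then g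
      else if |q.2.2 - r.2| ≤ HASH_THRESHOLD then g ++ [r.1] else g) [q.2.1]
    if group.length > 1 then (st.1 ++ [group], PySem.Set.update st.2 group) else st

-- The bucket dictionary B builds, as a function of the item list
def pvBuckets (items : List (String × Int)) : PySem.Dict Int (List (Int × String)) :=
  (PySem.List.enumerate items 0).foldl
    (fun (b : PySem.Dict Int (List (Int × String))) q => b.modify q.2.2 [] (· ++ [(q.1, q.2.1)]))
    PySem.Dict.empty

-- Step function of B's outer loop
def pvStepB (items : List (String × Int)) (st : List (List String) × PySem.Set String)
    (q : Int × String × Int) : List (List String) × PySem.Set String :=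
  if PySem.Set.contains st.2 q.2.1 then st
  else
    let cands := [q.2.2 - 3, q.2.2 - 2, q.2.2 - 1, q.2.2, q.2.2 + 1, q.2.2 + 2, q.2.2 + 3].foldl (fun c h =>
      ((pvBuckets items).getD h []).foldl (fun c r =>
        if r.1 > q.1 ∧ PySem.Set.contains st.2 r.2 = false then c ++ [r] else c) c) []
    if cands.isEmpty then st
    else
      let group := q.2.1 :: (PySem.List.sorted cands (fun t => t.1) false).map (·.2)
      (st.1 ++ [group], PySem.Set.update st.2 group)

lemma pv_A_eq (hashes : List (String × Int)) :
    group_duplicates hashes =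
      ((PySem.List.enumerate ((PySem.Dict.ofList hashes).items) 0).foldl
        (pvStepA ((PySem.Dict.ofList hashes).items)) ([], PySem.Set.empty)).1 := rfl

lemma pv_B_eq (hashes : List (String × Int)) :
    group_duplicates_alt hashes =
      ((PySem.List.enumerate ((PySem.Dict.ofList hashes).items) 0).foldl
        (pvStepB ((PySem.Dict.ofList hashes).items)) ([], PySem.Set.empty)).1 := rfl

-- two filters with pointwise-disjoint predicates, appended, are a permutation of the filter of the disjunction
lemma pv_filter_or_perm {α : Type} (p q : α → Bool) (xs : List α)
    (h : ∀ x, ¬(p x = true ∧ q x = true)) :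
    (xs.filter p ++ xs.filter q).Perm (xs.filter (fun x => p x || q x)) := by
  induction xs with
  | nil => simp
  | cons x t ih =>
    cases hp : p x with
    | true =>
      have hq : q x = false := by
        cases hqq : q x
        · rfl
        · exact absurd ⟨hp, hqq⟩ (h x)
      simpa [List.filter_cons, hp, hq] using ih.cons x
    | false =>
      cases hq : q x with
      | false => simpa [List.filter_cons, hp, hq] using ih
      | true =>
        simp only [List.filter_cons, hp, hq, Bool.false_or, if_true, if_false, cond_true, cond_false]
        exact List.perm_middle.trans (ih.cons x)

-- bucket-by-bucket collection over distinct keys is a permutation of one filtered pass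
lemma pv_flatMap_filter_key_perm {α κ : Type} [DecidableEq κ] [BEq κ] [LawfulBEq κ]
    (xs : List α) (key : α → κ) (Q : α → Bool) :
    ∀ ks : List κ, ks.Nodup →
    (ks.flatMap (fun k => xs.filter (fun x => key x == k && Q x))).Perm
      (xs.filter (fun x => decide (key x ∈ ks) && Q x)) := by
  intro ks
  induction ks with
  | nil => intro _; simp
  | cons k ks ih =>
    intro hnd
    have hk : k ∉ ks := (List.nodup_cons.mp hnd).1
    have htail := ih (List.nodup_cons.mp hnd).2
    rw [List.flatMap_cons]
    refine ((List.Perm.append_left _ htail).trans ?_)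
    have hdisj : ∀ x, ¬((key x == k && Q x) = true ∧ (decide (key x ∈ ks) && Q x) = true) := by
      intro x hx
      rcases hx with ⟨h1, h2⟩
      simp only [Bool.and_eq_true, beq_iff_eq, decide_eq_true_eq] at h1 h2
      exact hk (h1.1 ▸ h2.1)
    refine (pv_filter_or_perm _ _ xs hdisj).trans ?_
    have : ∀ x ∈ xs, ((key x == k && Q x) || (decide (key x ∈ ks) && Q x))
        = (decide (key x ∈ k :: ks) && Q x) := by
      intro x _
      by_cases h1 : key x = k <;> by_cases h2 : key x ∈ ks <;> cases hQ : Q x <;>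
        simp [h1, h2, hQ, List.mem_cons]
    rw [List.filter_congr this]

def pvProj (q : Int × String × Int) : Int × String := (q.1, q.2.1)

lemma pv_bucket_getD (l : List (String × Int)) (h : Int) :
    (pvBuckets l).getD h []
    = ((PySem.List.enumerate l 0).filter (fun q => q.2.2 == h)).map pvProj := by
  have h1 : pvBuckets l
      = ((PySem.List.enumerate l 0).map (fun q => (q.2.2, (q.1, q.2.1)))).foldl
          (fun d p => d.modify p.1 [] (· ++ [p.2])) PySem.Dict.empty := by
    rw [List.foldl_map]; rfl
  rw [h1, PySem.Dict.getD_foldl_modify_append]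
  rw [List.filter_map, List.map_map]
  simp only [PySem.Dict.getD_empty, List.nil_append]
  rfl


lemma pv_enum_filter_drop {α : Type} (R : α → Bool) :
    ∀ (l : List α) (s i : Int),
    ((PySem.List.enumerate l s).filter (fun q => decide (i < q.1) && R q.2)).map (fun q => q.2)
    = (l.drop (i + 1 - s).toNat).filter R := by
  intro l
  induction l with
  | nil => intro s i; simp [PySem.List.enumerate]
  | cons x t ih =>
    intro s i
    rw [PySem.List.enumerate_cons]
    by_cases hs : i < s
    · have h0 : (i + 1 - s).toNat = 0 := by omega
      have h0' : (i + 1 - (s + 1)).toNat = 0 := by omega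
      have ht := ih (s + 1) i
      rw [h0'] at ht
      simp only [List.filter_cons, h0, List.drop_zero]
      cases hR : R x <;> simp [hs, hR, ht]
    · have h1 : (i + 1 - s).toNat = (i + 1 - (s + 1)).toNat + 1 := by omega
      have ht := ih (s + 1) i
      simp only [List.filter_cons, h1, List.drop_succ_cons]
      simp [hs, ht]

lemma pv_hs_nodup (a : Int) : ([a - 3, a - 2, a - 1, a, a + 1, a + 2, a + 3] : List Int).Nodup := by
  simp only [List.nodup_cons, List.mem_cons, List.not_mem_nil, or_false, not_or,
    List.nodup_nil, and_true]
  norm_num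
  omega

-- the heart: on every entry of the enumeration, A's rescan step and B's bucket step agree
lemma pv_step_eq (items : List (String × Int)) (q : Int × String × Int)
    (hq : q ∈ PySem.List.enumerate items 0)
    (st : List (List String) × PySem.Set String) :
    pvStepA items st q = pvStepB items st q := by
  obtain ⟨k, hk, rfl⟩ := (PySem.List.mem_enumerate_iff items 0 q).mp hq
  set i : Int := 0 + (k : Int) with hi
  have hi0 : 0 ≤ i := by omega
  simp only [pvStepA, pvStepB]
  by_cases hcont : PySem.Set.contains st.2 (items[k].1) = true
  · rw [if_pos hcont, if_pos hcont]
  · rw [if_neg hcont, if_neg hcont]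
    -- names
    set p1 : String := items[k].1
    set h1 : Int := items[k].2
    set used : PySem.Set String := st.2
    set R : String × Int → Bool :=
      fun r => !(PySem.Set.contains used r.1) && decide (|h1 - r.2| ≤ HASH_THRESHOLD) with hR
    set TA : List String := ((items.drop (i + 1).toNat).filter R).map (fun r => r.1) with hTA
    -- A's inner loop
    have hslice : PySem.List.slice items (some (i + 1)) none = items.drop (i + 1).toNat :=
      PySem.List.slice_from items (by omega)
    have hA : (PySem.List.slice items (some (i + 1)) none).foldl (fun g r =>
        if PySem.Set.contains used r.1 then g
        else if |h1 - r.2| ≤ HASH_THRESHOLD then g ++ [r.1] else g) [p1] = p1 :: TA := by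
      rw [hslice]
      rw [PySem.List.foldl_congr_mem' _ _
        (fun g r => if R r = true then g ++ [r.1] else g) _ ?_]
      · rw [PySem.List.foldl_append_if R (fun r => r.1)]
        simp [hTA]
      · intro r _ g
        show (if PySem.Set.contains used r.1 = true then g
              else if |h1 - r.2| ≤ HASH_THRESHOLD then g ++ [r.1] else g)
            = (if R r = true then g ++ [r.1] else g)
        cases hc : PySem.Set.contains used r.1
        · have hcm : r.1 ∉ used := fun hm => by
            rw [← PySem.Set.contains_iff used r.1] at hm; rw [hc] at hm; cases hm
          by_cases h2 : |h1 - r.2| ≤ HASH_THRESHOLD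
          · rw [if_neg (by simp [hcm]), if_pos h2, if_pos (by rw [hR]; simp [hcm, h2])]
          · rw [if_neg (by simp [hcm]), if_neg h2, if_neg (by rw [hR]; simp [hcm, h2])]
        · have hcm : r.1 ∈ used := (PySem.Set.contains_iff used r.1).mp hc
          rw [if_pos (by simp [hcm]), if_neg (by rw [hR]; simp [hcm])]
    -- B's candidate collection
    set hs : List Int := [h1 - 3, h1 - 2, h1 - 1, h1, h1 + 1, h1 + 2, h1 + 3] with hhs
    set Pq : Int × String × Int → Bool :=
      fun q2 => decide (q2.1 > i ∧ PySem.Set.contains used q2.2.1 = false) with hPq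
    set E := PySem.List.enumerate items 0 with hE
    set cands := hs.foldl (fun c h =>
      ((pvBuckets items).getD h []).foldl (fun c r =>
        if r.1 > i ∧ PySem.Set.contains used r.2 = false then c ++ [r] else c) c) [] with hcands
    have hcand1 : cands = (hs.flatMap (fun h => E.filter (fun q2 => q2.2.2 == h && Pq q2))).map pvProj := by
      rw [hcands]
      rw [PySem.List.foldl_congr_mem' _ _
        (fun c h => c ++ (E.filter (fun q2 => q2.2.2 == h && Pq q2)).map pvProj) _ ?_]
      · rw [PySem.List.foldl_append_eq_flatMap]
        rw [List.map_flatMap]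
        rfl
      · intro h _ c
        have e1 := PySem.List.foldl_append_ite_eq_filter
          (fun r : Int × String => r.1 > i ∧ PySem.Set.contains used r.2 = false)
          ((pvBuckets items).getD h []) c
        rw [e1, pv_bucket_getD, List.filter_map, List.filter_filter]
        congr 1
        congr 1
        apply List.filter_congr
        intro q2 _
        by_cases hp : q2.1 > i ∧ PySem.Set.contains used q2.2.1 = false <;>
          cases hb : (q2.2.2 == h) <;> simp [hPq, pvProj, Function.comp, hp, hb]
    set W := E.filter (fun q2 => decide (q2.2.2 ∈ hs) && Pq q2) with hW
    have hperm : (hs.flatMap (fun h => E.filter (fun q2 => q2.2.2 == h && Pq q2))).Perm W :=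
      pv_flatMap_filter_key_perm E (fun q2 => q2.2.2) Pq hs (pv_hs_nodup h1)
    have hWpair : W.Pairwise (fun a b => (pvProj a).1 < (pvProj b).1) := by
      exact List.Pairwise.filter _ (PySem.List.pairwise_lt_enumerate items 0)
    have hsorted : PySem.List.sorted cands (fun t => t.1) false = W.map pvProj := by
      apply PySem.List.sorted_eq_of_perm_of_pairwise_lt
      · rw [hcand1]
        exact (hperm.map pvProj).symm
      · exact (List.pairwise_map).mpr hWpair
    -- the sorted candidates, projected to names, are exactly A's tail
    have hWfil : W = E.filter (fun q2 => decide (i < q2.1) && R q2.2) := by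
      rw [hW]
      apply List.filter_congr
      intro q2 _
      have habs : (q2.2.2 ∈ hs) ↔ |h1 - q2.2.2| ≤ 3 := by
        rw [abs_le]
        simp only [hhs, List.mem_cons, List.not_mem_nil, or_false]
        omega
      by_cases hm : q2.2.2 ∈ hs <;> by_cases hlt : i < q2.1 <;>
        cases hc : PySem.Set.contains used q2.2.1 <;>
          simp [hPq, hR, hm, hlt, hc, gt_iff_lt, HASH_THRESHOLD, habs.symm]
    have htail : (W.map pvProj).map (fun t => t.2) = TA := by
      rw [hWfil, hTA, List.map_map]
      have hd := pv_enum_filter_drop R items 0 i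
      have h2 : (i + 1 - 0).toNat = (i + 1).toNat := by omega
      rw [h2] at hd
      rw [← hE] at hd
      rw [← hd, List.map_map]
      rfl
    -- empty tests agree
    have hnil : cands.isEmpty = true ↔ TA = [] := by
      rw [List.isEmpty_iff, hcand1, ← htail, List.map_eq_nil_iff, List.map_eq_nil_iff,
        List.map_eq_nil_iff]
      constructor
      · intro h
        exact ((h ▸ hperm).symm).eq_nil
      · intro h
        exact (h ▸ hperm).eq_nil
    -- put the pieces together
    rw [hA, hsorted, htail]
    by_cases hT : TA = []
    · rw [if_neg (by rw [hT]; simp), if_pos (hnil.mpr hT)]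
    · have hc1 : ¬ cands.isEmpty = true := fun h => hT (hnil.mp h)
      have hlen1 : (p1 :: TA).length > 1 := by
        have hp : TA.length ≠ 0 := fun h => hT (List.length_eq_zero_iff.mp h)
        simp only [List.length_cons]
        omega
      rw [if_pos hlen1, if_neg hc1]

-- ===== VERDICT (by name: the statement is the Claim_ definition above) =====
theorem group_duplicates_spec : Claim_equal_group_duplicates := by
  intro hashes _
  unfold Spec_group_duplicates
  rw [pv_A_eq, pv_B_eq]
  congr 1
  exact PySem.List.foldl_congr_mem' _ _ _ _
    (fun q hq st => pv_step_eq ((PySem.Dict.ofList hashes).items) q hq st)
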